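-- pv_equiv track=rewrite | github.com/andrewch8o/cloudinary-cli | cloudinary_cli/utils/utils.py | normalize_list_params
-- ===== SOURCE A (Python) =====
-- def normalize_list_params(params):
--     """
--     Normalizes parameters that could be provided as strings separated by ','.
--
--     >>> normalize_list_params(["f1,f2", "f3"])
--     ["f1", "f2", "f3"]
--
--     :param params: Params to normalize.
--     :type params: list
--
--     :return: A list of normalized params.
--     :rtype list
--     """
--     normalized_params = []
--     for f in list(params):
--         if "," in f:
--             normalized_params += f.split(",")
--         else:
--             normalized_params.append(f)
--
--     return normalized_params
-- ===== SOURCE B (Python) =====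
-- def normalize_list_params(params):
--     return ",".join(params).split(",") if params else []
-- ===== Notes on version B (the rewrite author's own statement) =====
-- stated objective: idiomatic
-- what changed: Replaces the element-by-element loop with a comma-membership branch by a single join of the whole list followed by one split on commas (guarded for the empty list), which flattens identically since the inserted join commas and embedded commas are the same split points.
import Mathlib
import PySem

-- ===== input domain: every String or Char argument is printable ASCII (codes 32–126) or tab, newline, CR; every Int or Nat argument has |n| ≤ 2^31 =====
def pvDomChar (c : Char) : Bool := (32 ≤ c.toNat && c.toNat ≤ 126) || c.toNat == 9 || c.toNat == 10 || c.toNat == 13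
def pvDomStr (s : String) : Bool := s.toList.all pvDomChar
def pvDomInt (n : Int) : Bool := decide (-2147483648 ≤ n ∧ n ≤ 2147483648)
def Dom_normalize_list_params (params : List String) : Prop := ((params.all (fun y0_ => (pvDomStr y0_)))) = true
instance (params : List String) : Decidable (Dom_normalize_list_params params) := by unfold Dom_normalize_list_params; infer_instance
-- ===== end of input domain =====

-- B replaces A's per-element loop-and-branch by one ",".join followed by one split on "," (idiomatic one-liner; same cost).

-- f.split(",") — sep is the non-empty literal ",", so Python's split never raises (exact via PySem.Chars.splitOn)
def pySplitComma (f : String) : List String :=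
  (PySem.Chars.splitOn f.toList [',']).map String.ofList

-- ===== PORT A =====
def normalize_list_params (params : List String) : List String :=
  params.foldl
    (fun normalized_params f =>
      if PySem.Str.isIn "," f then normalized_params ++ pySplitComma f
      else normalized_params ++ [f])
    []

-- ===== PORT B =====
def normalize_list_params_alt (params : List String) : List String :=
  if params.isEmpty then [] else pySplitComma (PySem.Str.join "," params)

-- ===== PRECONDITION & SPEC =====
def Spec_normalize_list_params (params : List String) (out : List String) : Prop := out = normalize_list_params_alt params
instance (params : List String) (out : List String) : Decidable (Spec_normalize_list_params params out) := by unfold Spec_normalize_list_params; infer_instance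

-- ===== CLAIM (what is proved, stated in full; the proofs are below) =====
def Claim_equal_normalize_list_params : Prop := ∀ (params : List String), Dom_normalize_list_params params → Spec_normalize_list_params params (normalize_list_params params)

-- ===== LEMMAS AND PROOFS =====

-- simple structural comma-split on List Char (proof-side model of Chars.splitOn with sep = [','])
def msplit : List Char → List (List Char)
  | [] => [[]]
  | c :: rest => if c = ',' then [] :: msplit rest else (msplit rest).modifyHead (c :: ·)

theorem msplit_ne_nil (l : List Char) : msplit l ≠ [] := by
  induction l with
  | nil => simp [msplit]
  | cons c rest ih =>
    simp only [msplit]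
    split
    · simp
    · intro h
      exact ih (List.length_eq_zero_iff.mp (by simpa using congrArg List.length h))

theorem go_eq_msplit (fuel : Nat) (l cur : List Char) (acc : List (List Char)) (h : l.length ≤ fuel) :
    PySem.Chars.splitOn.go [','] (fuel + 1) l cur acc
      = acc.reverse ++ (msplit l).modifyHead (cur.reverse ++ ·) := by
  induction fuel generalizing l cur acc with
  | zero =>
    interval_cases hl : l.length
    match l, hl with
    | [], _ => simp [PySem.Chars.splitOn.go, msplit]
  | succ fuel ih =>
    match l with
    | [] => simp [PySem.Chars.splitOn.go, msplit]
    | c :: rest =>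
      simp only [List.length_cons, Nat.add_le_add_iff_right] at h
      by_cases hc : c = ','
      · subst hc
        rw [show PySem.Chars.splitOn.go [','] (fuel + 1 + 1) (',' :: rest) cur acc
              = PySem.Chars.splitOn.go [','] (fuel + 1) (List.drop 1 (',' :: rest)) [] (cur.reverse :: acc) by
            simp [PySem.Chars.splitOn.go, List.isPrefixOf]]
        rw [List.drop_one, List.tail_cons, ih rest [] (cur.reverse :: acc) h]
        rw [show msplit (',' :: rest) = [] :: msplit rest by rw [msplit]; simp]
        rw [show (fun x : List Char => List.reverse [] ++ x) = id from rfl,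
          List.modifyHead_id, List.modifyHead_cons]
        simp
      · rw [show PySem.Chars.splitOn.go [','] (fuel + 1 + 1) (c :: rest) cur acc
              = PySem.Chars.splitOn.go [','] (fuel + 1) rest (c :: cur) acc by
            simp only [PySem.Chars.splitOn.go, List.isPrefixOf]
            rw [if_neg (by simp; exact fun h' => hc h'.symm)]]
        rw [ih rest (c :: cur) acc h]
        simp only [msplit, if_neg hc, List.modifyHead_modifyHead]
        have hf : ((fun x => cur.reverse ++ x) ∘ fun x => c :: x)
            = (fun x => (c :: cur).reverse ++ x) := by
          funext x; simp
        rw [hf]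

theorem splitOn_eq_msplit (l : List Char) : PySem.Chars.splitOn l [','] = msplit l := by
  have := go_eq_msplit l.length l [] [] (le_refl _)
  simpa [PySem.Chars.splitOn, show (fun x : List Char => x) = id from rfl] using this

theorem msplit_no_comma (l : List Char) (h : ',' ∉ l) : msplit l = [l] := by
  induction l with
  | nil => rfl
  | cons c rest ih =>
    simp only [List.mem_cons, not_or] at h
    rw [msplit, if_neg (fun hc => h.1 hc.symm), ih h.2]
    simp [List.modifyHead]

theorem msplit_append_comma (xs ys : List Char) :
    msplit (xs ++ ',' :: ys) = msplit xs ++ msplit ys := by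
  induction xs with
  | nil => simp [msplit]
  | cons c rest ih =>
    by_cases hc : c = ','
    · simp [msplit, hc, ih]
    · simp only [List.cons_append, msplit, if_neg hc, ih]
      rcases hm : msplit rest with _ | ⟨h1, t1⟩
      · exact absurd hm (msplit_ne_nil rest)
      · simp [List.modifyHead]

theorem pySplitComma_no_comma (f : String) (h : PySem.Str.isIn "," f = false) :
    pySplitComma f = [f] := by
  have hmem : ',' ∉ f.toList := by
    intro hm
    exact (PySem.Chars.isIn_eq_false_iff _ _).mp h ((List.singleton_infix_iff _ _).mpr hm)
  simp [pySplitComma, splitOn_eq_msplit, msplit_no_comma _ hmem]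

theorem portA_eq_flatMap (params : List String) :
    normalize_list_params params = params.flatMap pySplitComma := by
  unfold normalize_list_params
  have hstep : (fun (acc : List String) (f : String) =>
      if PySem.Str.isIn "," f then acc ++ pySplitComma f else acc ++ [f])
      = (fun acc f => acc ++ (if PySem.Str.isIn "," f then pySplitComma f else [f])) := by
    funext acc f
    exact (apply_ite (acc ++ ·) _ _ _).symm
  rw [hstep, PySem.List.foldl_append_eq_flatMap]
  simp only [List.nil_append]
  apply List.flatMap_congr
  intro f _
  by_cases hf : PySem.Str.isIn "," f = true
  · rw [if_pos hf]
  · rw [if_neg hf, pySplitComma_no_comma f (eq_false_of_ne_true hf)]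

theorem msplit_join (ls : List (List Char)) (h : ls ≠ []) :
    msplit (PySem.Chars.join [','] ls) = ls.flatMap msplit := by
  induction ls with
  | nil => exact absurd rfl h
  | cons x rest ih =>
    cases rest with
    | nil => simp [PySem.Chars.join_singleton]
    | cons y rest' =>
      rw [PySem.Chars.join_cons_cons, List.append_assoc, List.singleton_append,
        msplit_append_comma, ih (by simp)]
      simp

-- ===== VERDICT (by name: the statement is the Claim_ definition above) =====
theorem normalize_list_params_spec : Claim_equal_normalize_list_params := by
  intro params _
  unfold Spec_normalize_list_params normalize_list_params_alt
  rw [portA_eq_flatMap]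
  cases params with
  | nil => simp
  | cons p ps =>
    rw [if_neg (by simp), pySplitComma, PySem.Str.toList_join,
      show (",".toList : List Char) = [','] from rfl, splitOn_eq_msplit,
      msplit_join _ (by simp), List.map_flatMap, List.flatMap_map]
    apply List.flatMap_congr
    intro f _
    simp [pySplitComma, splitOn_eq_msplit]
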